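-- pv_equiv track=rewrite | github.com/doshirush1901/ira-v3 | scripts/seed_neo4j_from_ingestion_log.py | _split_cypher_statements
-- ===== SOURCE A (Python) =====
-- def _split_cypher_statements(text: str) -> list[str]:
--     statements: list[str] = []
--     buf: list[str] = []
--     for line in text.splitlines():
--         stripped = line.strip()
--         if not stripped or stripped.startswith("//"):
--             continue
--         buf.append(line)
--         if stripped.endswith(";"):
--             stmt = "\n".join(buf).rstrip(";").strip()
--             if stmt:
--                 statements.append(stmt)
--             buf = []
--     if buf:
--         tail = "\n".join(buf).strip()
--         if tail:
--             statements.append(tail)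
--     return statements
-- ===== SOURCE B (Python) =====
-- def _split_cypher_statements(text: str) -> list[str]:
--     # Keep only meaningful lines, then split the kept lines into groups ending
--     # at each ';'-terminated line (plus one open trailing group), then render.
--     kept = [l for l in text.splitlines()
--             if l.strip() and not l.strip().startswith("//")]
--
--     def groups(lines):
--         if not lines:
--             return []
--         pre, rest = [], list(lines)
--         while rest and not rest[0].strip().endswith(";"):
--             pre.append(rest.pop(0))
--         if not rest:
--             return [(lines, False)]
--         return [(pre + [rest[0]], True)] + groups(rest[1:])
--
--     out = []
--     for g, closed in groups(kept):
--         stmt = "\n".join(g).rstrip(";").strip() if closed else "\n".join(g).strip()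
--         if stmt:
--             out.append(stmt)
--     return out
-- ===== Notes on version B (the rewrite author's own statement) =====
-- stated objective: alternative
-- what changed: A accumulates a buffer and flushes it inside one stateful fold over the lines; B first filters the meaningful lines, then recursively splits them into semicolon-terminated groups (span at each terminator line, open trailing group kept separate), and renders each group.
import Mathlib
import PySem

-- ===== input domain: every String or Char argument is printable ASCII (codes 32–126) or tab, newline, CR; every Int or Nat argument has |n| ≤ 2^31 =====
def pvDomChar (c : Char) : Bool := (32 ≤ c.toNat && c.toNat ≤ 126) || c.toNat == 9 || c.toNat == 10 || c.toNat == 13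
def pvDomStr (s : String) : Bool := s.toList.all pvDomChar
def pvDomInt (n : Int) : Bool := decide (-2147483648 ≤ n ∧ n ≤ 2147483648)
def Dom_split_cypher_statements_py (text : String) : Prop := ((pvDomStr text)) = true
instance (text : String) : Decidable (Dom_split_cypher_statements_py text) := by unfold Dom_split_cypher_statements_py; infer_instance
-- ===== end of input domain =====

-- B replaces A's incremental buffer-and-flush fold by a filter-then-group decomposition
-- (keep the meaningful lines, split them into semicolon-terminated groups, render each group); objective: alternative.

-- hand port of Python's s.rstrip(";") (PySem has no chars-argument rstrip):
-- exact — removes exactly the trailing ';' code points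
def pvRstripSemi (s : String) : String :=
  String.mk ((s.toList.reverse.dropWhile (fun c => c = ';')).reverse)

-- ===== PORT A =====
def pvStepA (st : List String × List String) (line : String) : List String × List String :=
  let stripped := PySem.Str.strip line
  if stripped = "" ∨ PySem.Str.startswith stripped "//" = true then st
  else
    let buf := st.2 ++ [line]
    if PySem.Str.endswith stripped ";" = true then
      let stmt := PySem.Str.strip (pvRstripSemi (PySem.Str.join "\n" buf))
      ((if stmt = "" then st.1 else st.1 ++ [stmt]), ([] : List String))
    else (st.1, buf)

def split_cypher_statements_py (text : String) : List String :=
  let r := (PySem.Str.splitlines text).foldl pvStepA ([], [])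
  if r.2 ≠ [] then
    let tail := PySem.Str.strip (PySem.Str.join "\n" r.2)
    if tail = "" then r.1 else r.1 ++ [tail]
  else r.1

-- ===== PORT B =====
def pvKeep (line : String) : Bool :=
  !(PySem.Str.strip line == "") && !PySem.Str.startswith (PySem.Str.strip line) "//"

def pvEnds (line : String) : Bool := PySem.Str.endswith (PySem.Str.strip line) ";"

def pvGroups : List String → List (List String × Bool)
  | [] => []
  | l :: ls =>
    let rest := (l :: ls).dropWhile (fun x => !pvEnds x)
    if hr : rest = [] then [(l :: ls, false)]
    else ((l :: ls).takeWhile (fun x => !pvEnds x) ++ [rest.head hr], true) :: pvGroups rest.tail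
termination_by ls => ls.length
decreasing_by
  have h1 : ((l :: ls).dropWhile (fun x => !pvEnds x)).length ≤ (l :: ls).length :=
    List.length_dropWhile_le _ _
  simp only [rest, List.length_tail, List.length_cons] at h1 ⊢
  omega

def pvEmit (g : List String × Bool) : List String :=
  let stmt := if g.2 then PySem.Str.strip (pvRstripSemi (PySem.Str.join "\n" g.1))
              else PySem.Str.strip (PySem.Str.join "\n" g.1)
  if stmt = "" then [] else [stmt]

def split_cypher_statements_py_alt (text : String) : List String :=
  let kept := (PySem.Str.splitlines text).filter pvKeep
  (pvGroups kept).foldl (fun out g => out ++ pvEmit g) []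

-- ===== PRECONDITION & SPEC =====
def Spec_split_cypher_statements_py (text : String) (out : List String) : Prop := out = split_cypher_statements_py_alt text
instance (text : String) (out : List String) : Decidable (Spec_split_cypher_statements_py text out) := by unfold Spec_split_cypher_statements_py; infer_instance

-- ===== CLAIM (what is proved, stated in full; the proofs are below) =====
def Claim_equal_split_cypher_statements_py : Prop := ∀ (text : String), Dom_split_cypher_statements_py text → Spec_split_cypher_statements_py text (split_cypher_statements_py text)

-- ===== LEMMAS AND PROOFS =====

-- A's loop step restricted to the kept lines (the skip branch removed)
def pvStepK (st : List String × List String) (line : String) : List String × List String :=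
  let buf := st.2 ++ [line]
  if pvEnds line = true then (st.1 ++ pvEmit (buf, true), [])
  else (st.1, buf)

-- A's continuation: what the rest of the loop + the tail clause contribute,
-- given the pending buffer and the remaining kept lines
def pvOut : List String → List String → List String
  | buf, [] => if buf = [] then [] else pvEmit (buf, false)
  | buf, l :: ls => if pvEnds l = true then pvEmit (buf ++ [l], true) ++ pvOut [] ls
                    else pvOut (buf ++ [l]) ls

theorem pvStepA_eq (st : List String × List String) (l : String) :
    pvStepA st l = if pvKeep l then pvStepK st l else st := by
  simp only [pvStepA, pvStepK, pvKeep, pvEnds]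
  by_cases h1 : PySem.Str.strip l = "" <;>
    by_cases h2 : PySem.Str.startswith (PySem.Str.strip l) "//" = true <;>
      by_cases h3 : PySem.Str.endswith (PySem.Str.strip l) ";" = true <;>
        simp_all [pvEmit] <;> split_ifs <;> simp

theorem foldl_stepA_filter (ls : List String) (st : List String × List String) :
    ls.foldl pvStepA st = (ls.filter pvKeep).foldl pvStepK st := by
  induction ls generalizing st with
  | nil => simp
  | cons l ls ih =>
    rw [List.foldl_cons, List.filter_cons, pvStepA_eq]
    by_cases h : pvKeep l = true
    · rw [if_pos h, if_pos h, List.foldl_cons, ih]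
    · rw [if_neg h, if_neg h, ih]

theorem foldl_stepK_out (ls : List String) (stmts buf : List String) :
    (let r := ls.foldl pvStepK (stmts, buf)
     if r.2 ≠ [] then
       let tail := PySem.Str.strip (PySem.Str.join "\n" r.2)
       if tail = "" then r.1 else r.1 ++ [tail]
     else r.1) = stmts ++ pvOut buf ls := by
  induction ls generalizing stmts buf with
  | nil =>
    simp only [List.foldl_nil, pvOut, pvEmit]
    split_ifs <;> simp_all
  | cons l ls ih =>
    simp only [List.foldl_cons, pvStepK, pvOut]
    by_cases h : pvEnds l = true
    · simp only [h, if_pos trivial, if_true, ih, List.append_assoc]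
    · simp only [h, if_false, Bool.false_eq_true, ih]

theorem pvOut_span (ls : List String) (buf : List String) :
    pvOut buf ls =
      match ls.dropWhile (fun x => !pvEnds x) with
      | [] => (if buf ++ ls = [] then [] else pvEmit (buf ++ ls, false))
      | b :: rs => pvEmit (buf ++ ls.takeWhile (fun x => !pvEnds x) ++ [b], true) ++ pvOut [] rs := by
  induction ls generalizing buf with
  | nil => simp [pvOut]
  | cons l ls ih =>
    by_cases h : pvEnds l = true
    · simp [pvOut, h, List.dropWhile, List.takeWhile]
    · simp only [pvOut, h, if_false, Bool.false_eq_true]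
      rw [ih]
      have hd : (l :: ls).dropWhile (fun x => !pvEnds x) = ls.dropWhile (fun x => !pvEnds x) := by
        simp [List.dropWhile, h]
      have ht : (l :: ls).takeWhile (fun x => !pvEnds x) = l :: ls.takeWhile (fun x => !pvEnds x) := by
        simp [List.takeWhile, h]
      rw [hd, ht]
      cases ls.dropWhile (fun x => !pvEnds x) <;> simp

theorem pvGroups_eq_nil : pvGroups [] = [] := by
  rw [pvGroups.eq_def]

theorem pvGroups_cons_nil {l : String} {ls : List String}
    (h : (l :: ls).dropWhile (fun x => !pvEnds x) = []) :
    pvGroups (l :: ls) = [(l :: ls, false)] := by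
  rw [pvGroups.eq_def]; simp only [h]; rfl

theorem pvGroups_cons_cons {l : String} {ls b rs : _}
    (h : (l :: ls).dropWhile (fun x => !pvEnds x) = b :: rs) :
    pvGroups (l :: ls) = ((l :: ls).takeWhile (fun x => !pvEnds x) ++ [b], true) :: pvGroups rs := by
  rw [pvGroups.eq_def]; simp [h]

theorem pvOut_eq_groups (ls : List String) :
    pvOut [] ls = (pvGroups ls).flatMap pvEmit := by
  induction ls using pvGroups.induct with
  | case1 => simp [pvOut, pvGroups_eq_nil]
  | case2 l ls rest hr =>
    have h : (l :: ls).dropWhile (fun x => !pvEnds x) = [] := hr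
    rw [pvOut_span, pvGroups_cons_nil h]
    simp [h]
  | case3 l ls rest hr ih =>
    obtain ⟨b, rs, h⟩ := List.exists_cons_of_ne_nil hr
    have h' : (l :: ls).dropWhile (fun x => !pvEnds x) = b :: rs := h
    rw [h] at ih
    simp only [List.tail_cons] at ih
    rw [pvOut_span, pvGroups_cons_cons h']
    simp [h, h', ih]

theorem foldl_emit (gs : List (List String × Bool)) (acc : List String) :
    gs.foldl (fun out g => out ++ pvEmit g) acc = acc ++ gs.flatMap pvEmit := by
  induction gs generalizing acc with
  | nil => simp
  | cons g gs ih => simp [ih]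

-- ===== VERDICT (by name: the statement is the Claim_ definition above) =====
theorem split_cypher_statements_py_spec : Claim_equal_split_cypher_statements_py := by
  intro text _
  unfold Spec_split_cypher_statements_py split_cypher_statements_py split_cypher_statements_py_alt
  rw [foldl_stepA_filter, foldl_stepK_out, foldl_emit, pvOut_eq_groups]
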